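-- pv_equiv track=rewrite | github.com/opencui/opendu | converter/pt.py | add_mark
-- ===== SOURCE A (Python) =====
-- def add_mark(utterance, candidates, left_mark, right_mark, separator):
--     marks = []
--     for span in candidates:
--         marks.append((True, span[0]))
--         marks.append((False, span[1]))
--     marks.sort(key=lambda x: x[1])
--     index = 0
--     res = []
--     for mark in marks:
--         if index != mark[1]:
--             res.append(utterance[index:mark[1]])
--         res.append(left_mark if mark[0] else right_mark)
--         index = mark[1]
--     return separator.join(res)
-- ===== SOURCE B (Python) =====
-- def add_mark(utterance, candidates, left_mark, right_mark, separator):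
--     events = []
--     for span in candidates:
--         events += [(True, span[0]), (False, span[1])]
--     index = 0
--     res = []
--     while events:
--         pos = min(e[1] for e in events)
--         if index != pos:
--             res.append(utterance[index:pos])
--         res.extend(left_mark if e[0] else right_mark for e in events if e[1] == pos)
--         events = [e for e in events if e[1] != pos]
--         index = pos
--     return separator.join(res)
-- ===== Notes on version B (the rewrite author's own statement) =====
-- stated objective: alternative
-- what changed: B eliminates the sort entirely: instead of building and stably sorting the 2n-element mark list, it repeatedly extracts the minimum remaining boundary position, emits the slice and that position's marks (in original stable order), and partitions the remaining events away - a selection-based loop over a shrinking event list.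
import Mathlib
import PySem

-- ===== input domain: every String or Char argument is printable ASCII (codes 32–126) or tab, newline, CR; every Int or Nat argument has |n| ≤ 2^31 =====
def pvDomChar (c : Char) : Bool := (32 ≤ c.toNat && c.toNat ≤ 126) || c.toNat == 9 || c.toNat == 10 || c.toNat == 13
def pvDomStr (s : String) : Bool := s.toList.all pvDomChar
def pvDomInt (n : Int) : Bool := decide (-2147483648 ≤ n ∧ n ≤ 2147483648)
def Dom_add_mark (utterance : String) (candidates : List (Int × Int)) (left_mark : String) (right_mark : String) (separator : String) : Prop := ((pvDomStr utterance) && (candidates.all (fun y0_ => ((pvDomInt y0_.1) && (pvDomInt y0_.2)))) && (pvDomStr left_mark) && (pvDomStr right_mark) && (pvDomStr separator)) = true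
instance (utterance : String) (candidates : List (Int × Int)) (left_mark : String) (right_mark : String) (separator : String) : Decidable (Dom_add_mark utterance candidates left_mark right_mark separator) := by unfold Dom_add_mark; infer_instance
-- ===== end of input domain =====

-- B is sort-free: it repeatedly extracts the minimum remaining boundary position and its marks,
-- partitioning the event list, instead of A's stable sort of all marks (objective: alternative algorithm).

-- ===== PORT A =====
def add_mark (utterance : String) (candidates : List (Int × Int)) (left_mark : String) (right_mark : String) (separator : String) : String :=
  let marks : List (Bool × Int) :=
    candidates.foldl (fun ms span => (ms ++ [(true, span.1)]) ++ [(false, span.2)]) []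
  let marks := PySem.List.sorted marks (fun x => x.2)
  let st : Int × List String :=
    marks.foldl
      (fun st mark =>
        let res := if st.1 ≠ mark.2
          then st.2 ++ [PySem.Str.slice utterance (some st.1) (some mark.2)]
          else st.2
        let res := res ++ [if mark.1 then left_mark else right_mark]
        (mark.2, res))
      (0, [])
  PySem.Str.join separator st.2

-- ===== PORT B =====
-- pos = min(e[1] for e in events): Python's min over a nonempty list, as a left fold keeping the smaller value
def pvMinPos (a : Int) (t : List (Bool × Int)) : Int :=
  t.foldl (fun m x => if x.2 < m then x.2 else m) a

lemma pvMinPos_spec (t : List (Bool × Int)) : ∀ a : Int,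
    (pvMinPos a t = a ∨ ∃ x ∈ t, x.2 = pvMinPos a t) ∧ pvMinPos a t ≤ a ∧ ∀ x ∈ t, pvMinPos a t ≤ x.2 := by
  induction t with
  | nil => intro a; exact ⟨Or.inl rfl, le_refl a, by simp⟩
  | cons y t ih =>
    intro a
    have h := ih (if y.2 < a then y.2 else a)
    have hstep : pvMinPos a (y :: t) = pvMinPos (if y.2 < a then y.2 else a) t := rfl
    refine ⟨?_, ?_, ?_⟩
    · rcases h.1 with h1 | ⟨x, hx, hx2⟩
      · rw [hstep, h1]
        by_cases hy : y.2 < a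
        · exact Or.inr ⟨y, by simp, by simp [hy]⟩
        · exact Or.inl (by simp [hy])
      · exact Or.inr ⟨x, by simp [hx], by rw [hstep]; exact hx2⟩
    · rw [hstep]
      have := h.2.1
      by_cases hy : y.2 < a <;> simp [hy] at this ⊢ <;> omega
    · intro x hx
      rw [hstep]
      rcases List.mem_cons.mp hx with rfl | hxt
      · have := h.2.1
        by_cases hy : x.2 < a <;> simp [hy] at this ⊢ <;> omega
      · exact h.2.2 x hxt

-- removing the minimum's group strictly shrinks the event list (used for termination)
lemma pv_filter_shrink (e : Bool × Int) (t : List (Bool × Int)) :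
    ((e :: t).filter (fun x => x.2 ≠ pvMinPos e.2 t)).length < (e :: t).length := by
  have h := pvMinPos_spec t e.2
  have hex : ∃ x ∈ e :: t, ¬ (x.2 ≠ pvMinPos e.2 t) := by
    rcases h.1 with h1 | ⟨x, hx, hx2⟩
    · exact ⟨e, by simp, by simp [h1]⟩
    · exact ⟨x, by simp [hx], by simp [hx2]⟩
  obtain ⟨x, hx, hpx⟩ := hex
  calc ((e :: t).filter (fun x => x.2 ≠ pvMinPos e.2 t)).length
      < (e :: t).length := by
        refine List.length_filter_lt_length_iff_exists.mpr ⟨x, hx, by simpa using hpx⟩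

def addMarkSweep (u lm rm : String) (events : List (Bool × Int)) (index : Int) (res : List String) : List String :=
  match events with
  | [] => res
  | e :: t =>
    let pos := pvMinPos e.2 t
    let res1 := if index ≠ pos then res ++ [PySem.Str.slice u (some index) (some pos)] else res
    let res2 := res1 ++ ((e :: t).filter (fun x => x.2 == pos)).map (fun x => if x.1 then lm else rm)
    addMarkSweep u lm rm ((e :: t).filter (fun x => x.2 ≠ pos)) pos res2
termination_by events.length
decreasing_by exact pv_filter_shrink e t

def add_mark_alt (utterance : String) (candidates : List (Int × Int)) (left_mark : String) (right_mark : String) (separator : String) : String :=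
  let events : List (Bool × Int) :=
    candidates.foldl (fun ev span => ev ++ [(true, span.1), (false, span.2)]) []
  PySem.Str.join separator (addMarkSweep utterance left_mark right_mark events 0 [])

-- ===== PRECONDITION & SPEC =====
def Spec_add_mark (utterance : String) (candidates : List (Int × Int)) (left_mark : String) (right_mark : String) (separator : String) (out : String) : Prop := out = add_mark_alt utterance candidates left_mark right_mark separator
instance (utterance : String) (candidates : List (Int × Int)) (left_mark : String) (right_mark : String) (separator : String) (out : String) : Decidable (Spec_add_mark utterance candidates left_mark right_mark separator out) := by unfold Spec_add_mark; infer_instance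

-- ===== CLAIM (what is proved, stated in full; the proofs are below) =====
def Claim_equal_add_mark : Prop := ∀ (utterance : String) (candidates : List (Int × Int)) (left_mark : String) (right_mark : String) (separator : String), Dom_add_mark utterance candidates left_mark right_mark separator → Spec_add_mark utterance candidates left_mark right_mark separator (add_mark utterance candidates left_mark right_mark separator)

-- ===== LEMMAS AND PROOFS =====

-- A's per-event loop body, named so the lemmas can speak about it
def pvStepA (u lm rm : String) (st : Int × List String) (mark : Bool × Int) : Int × List String :=
  (mark.2,
    (if st.1 ≠ mark.2 then st.2 ++ [PySem.Str.slice u (some st.1) (some mark.2)] else st.2)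
      ++ [if mark.1 then lm else rm])

-- A's mark-building loop is the flat list of boundary marks
lemma pv_marks_foldl (candidates : List (Int × Int)) (acc : List (Bool × Int)) :
    candidates.foldl (fun ms span => (ms ++ [(true, span.1)]) ++ [(false, span.2)]) acc
      = acc ++ candidates.flatMap (fun s => [(true, s.1), (false, s.2)]) := by
  induction candidates generalizing acc with
  | nil => simp
  | cons s t _ => simp [List.flatMap]

-- B's event-building loop is the same flat list
lemma pv_events_foldl (candidates : List (Int × Int)) (acc : List (Bool × Int)) :
    candidates.foldl (fun ev span => ev ++ [(true, span.1), (false, span.2)]) acc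
      = acc ++ candidates.flatMap (fun s => [(true, s.1), (false, s.2)]) := by
  induction candidates generalizing acc with
  | nil => simp
  | cons s t _ => simp [List.flatMap]

-- inserting an element between a prefix of not-greater keys and a suffix of greater keys
lemma pv_insertBy_middle {α : Type} (before : α → α → Bool) (x : α) (pre suf : List α)
    (h1 : ∀ y ∈ pre, before x y = false) (h2 : ∀ y ∈ suf, before x y = true) :
    PySem.List.insertBy before x (pre ++ suf) = pre ++ x :: suf := by
  induction pre with
  | nil =>
    cases suf with
    | nil => rfl
    | cons y ys => simp [PySem.List.insertBy, h2 y (by simp)]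
  | cons p pre ih =>
    have hp : before x p = false := h1 p (by simp)
    simp [PySem.List.insertBy, hp]
    exact ih (fun y hy => h1 y (by simp [hy]))

lemma pv_dropWhile_lt (k0 : Int) : ∀ (l : List Int), l.Pairwise (· < ·) →
    ∀ b ∈ l.dropWhile (fun a => decide (a < k0)), ¬ b < k0 := by
  intro l hl
  induction l with
  | nil => simp
  | cons a t ih =>
    rw [List.pairwise_cons] at hl
    by_cases h : a < k0
    · simpa [List.dropWhile_cons, h] using ih hl.2
    · simp only [List.dropWhile_cons, decide_eq_true_eq, if_neg h]
      intro b hb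
      rcases List.mem_cons.mp hb with rfl | hbt
      · exact h
      · have := hl.1 b hbt; omega

-- how the strictly increasing key list develops when one more key arrives
lemma pv_decomp (xs : List Int) (k0 : Int) :
    ∃ L M R,
      PySem.List.sorted (PySem.Set.ofList xs) (fun k => k) = L ++ (M ++ R) ∧
      PySem.List.sorted (PySem.Set.ofList (xs ++ [k0])) (fun k => k) = L ++ (k0 :: R) ∧
      (M = [] ∨ M = [k0]) ∧ (M = [] → k0 ∉ xs) ∧
      (∀ a ∈ L, a < k0) ∧ (∀ b ∈ R, k0 < b) := by
  have hpw := PySem.List.sorted_ofList_pairwise_lt (xs := xs) (κ := Int)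
  by_cases hk : k0 ∈ xs
  · have hmem : k0 ∈ PySem.Set.ofList xs := (PySem.Set.mem_ofList xs k0).mpr hk
    have hadd : PySem.Set.ofList (xs ++ [k0]) = PySem.Set.ofList xs := by
      rw [PySem.Set.ofList_append_singleton]; simp [PySem.Set.add, hk]
    have hks : k0 ∈ PySem.List.sorted (PySem.Set.ofList xs) (fun k => k) :=
      (PySem.List.mem_sorted _ _ _ _).mpr hmem
    obtain ⟨L, R, hLR⟩ := List.append_of_mem hks
    rw [hLR, List.pairwise_append] at hpw
    refine ⟨L, [k0], R, by rw [hLR]; simp, by rw [hadd, hLR], Or.inr rfl, by simp, ?_, ?_⟩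
    · intro a ha; exact hpw.2.2 a ha k0 (by simp)
    · intro b hb; exact (List.pairwise_cons.mp hpw.2.1).1 b hb
  · have hmem : k0 ∉ PySem.Set.ofList xs := fun h => hk ((PySem.Set.mem_ofList xs k0).mp h)
    have hadd : PySem.Set.ofList (xs ++ [k0]) = PySem.Set.ofList xs ++ [k0] := by
      rw [PySem.Set.ofList_append_singleton]; simp [PySem.Set.add, hk]
    set Ks := PySem.List.sorted (PySem.Set.ofList xs) (fun k => k) with hKs
    have hsplit : Ks.takeWhile (fun a => decide (a < k0)) ++ Ks.dropWhile (fun a => decide (a < k0)) = Ks :=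
      List.takeWhile_append_dropWhile
    have hL : ∀ a ∈ Ks.takeWhile (fun a => decide (a < k0)), a < k0 := by
      intro a ha; simpa using List.mem_takeWhile_imp ha
    have hR : ∀ b ∈ Ks.dropWhile (fun a => decide (a < k0)), k0 < b := by
      intro b hb
      have h1 : ¬ b < k0 := pv_dropWhile_lt k0 Ks hpw b hb
      have h2 : b ≠ k0 := by
        rintro rfl
        have : b ∈ Ks := by rw [← hsplit]; exact List.mem_append_right _ hb
        exact hmem ((PySem.List.mem_sorted _ _ _ _).mp this)
      omega
    have hsortadd : PySem.List.sorted (PySem.Set.ofList xs ++ [k0]) (fun k => k)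
        = PySem.List.insertBy (fun a b => decide (a < b)) k0 Ks := by
      rw [PySem.List.sorted_eq_foldl_insertBy, List.foldl_append, ← PySem.List.sorted_eq_foldl_insertBy]
      rfl
    refine ⟨Ks.takeWhile (fun a => decide (a < k0)), [], Ks.dropWhile (fun a => decide (a < k0)),
      by rw [← hsplit]; simp, ?_, Or.inl rfl, fun _ => hk, hL, hR⟩
    rw [hadd, hsortadd]
    conv_lhs => rw [← hsplit]
    exact pv_insertBy_middle (fun a b => decide (a < b)) k0 _ _
      (fun y hy => by simp only [decide_eq_false_iff_not]; have := hL y hy; omega)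
      (fun y hy => by simp only [decide_eq_true_eq]; exact hR y hy)

-- the stable sort by position is the concatenation of the per-position groups, in sorted key order
lemma pv_sorted_groups (l : List (Bool × Int)) :
    PySem.List.sorted l (fun m => m.2)
      = (PySem.List.sorted (PySem.Set.ofList (l.map (fun m => m.2))) (fun k => k)).flatMap
          (fun k => l.filter (fun m => m.2 == k)) := by
  induction l using List.reverseRecOn with
  | nil => rfl
  | append_singleton l x ih =>
    have hsort : PySem.List.sorted (l ++ [x]) (fun m => m.2)
        = PySem.List.insertBy (fun a b => decide (a.2 < b.2)) x (PySem.List.sorted l (fun m => m.2)) := by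
      rw [PySem.List.sorted_eq_foldl_insertBy, List.foldl_append, ← PySem.List.sorted_eq_foldl_insertBy]
      rfl
    obtain ⟨L, M, R, hS, hS', hM, hMnot, hLlt, hRgt⟩ := pv_decomp (l.map (fun m => m.2)) x.2
    have hmap : (l ++ [x]).map (fun m => m.2) = l.map (fun m => m.2) ++ [x.2] := by simp
    have hgM : M.flatMap (fun k => l.filter (fun m => m.2 == k)) = l.filter (fun m => m.2 == x.2) := by
      rcases hM with h | h
      · subst h
        simp only [List.flatMap_nil]
        symm
        rw [List.filter_eq_nil_iff]
        intro m hm hmk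
        exact (hMnot rfl) (List.mem_map.mpr ⟨m, hm, by simpa using hmk⟩)
      · subst h; simp
    have hfilter : ∀ k, (l ++ [x]).filter (fun m => m.2 == k)
        = l.filter (fun m => m.2 == k) ++ (if x.2 == k then [x] else []) := by
      intro k
      rw [List.filter_append]
      by_cases h : x.2 = k
      · have hb : (x.2 == k) = true := by simpa using h
        simp [List.filter, hb]
      · have hb : (x.2 == k) = false := by simpa using h
        simp [List.filter, hb]
    have hmemkey : ∀ k : Int, ∀ y ∈ l.filter (fun m => m.2 == k), y.2 = k := by
      intro k y hy
      have := (List.mem_filter.mp hy).2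
      simpa using this
    have hins := pv_insertBy_middle (fun a b => decide (a.2 < b.2)) x
      (L.flatMap (fun k => l.filter (fun m => m.2 == k)) ++ l.filter (fun m => m.2 == x.2))
      (R.flatMap (fun k => l.filter (fun m => m.2 == k)))
      (by
        intro y hy
        simp only [decide_eq_false_iff_not]
        rcases List.mem_append.mp hy with h | h
        · obtain ⟨a, ha, hya⟩ := List.mem_flatMap.mp h
          have h5 := hmemkey a y hya
          have h6 := hLlt a ha
          omega
        · have h5 := hmemkey x.2 y h
          omega)
      (by
        intro y hy
        simp only [decide_eq_true_eq]
        obtain ⟨b, hb, hyb⟩ := List.mem_flatMap.mp hy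
        have h5 := hmemkey b y hyb
        have h6 := hRgt b hb
        omega)
    have hLcongr : List.flatMap (fun k => List.filter (fun m => m.2 == k) (l ++ [x])) L
        = List.flatMap (fun k => List.filter (fun m => m.2 == k) l) L := by
      refine List.flatMap_congr ?_
      intro k hkL
      rw [hfilter k]
      have := hLlt k hkL
      simp [show ¬ x.2 = k by omega]
    have hRcongr : List.flatMap (fun k => List.filter (fun m => m.2 == k) (l ++ [x])) R
        = List.flatMap (fun k => List.filter (fun m => m.2 == k) l) R := by
      refine List.flatMap_congr ?_
      intro k hkR
      rw [hfilter k]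
      have := hRgt k hkR
      simp [show ¬ x.2 = k by omega]
    have hmid : List.filter (fun m => m.2 == x.2) (l ++ [x])
        = List.filter (fun m => m.2 == x.2) l ++ [x] := by
      rw [hfilter x.2]; simp
    rw [hsort, ih, hS, List.flatMap_append, List.flatMap_append, hgM, ← List.append_assoc, hins]
    simp only [hmap, hS', List.flatMap_append, List.flatMap_cons]
    rw [hLcongr, hRcongr, hmid]
    simp

-- two strictly increasing integer lists with the same members are equal
lemma pv_eq_of_sorted_mem : ∀ (a b : List Int), a.Pairwise (· < ·) → b.Pairwise (· < ·) →
    (∀ x, x ∈ a ↔ x ∈ b) → a = b := by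
  intro a
  induction a with
  | nil =>
    intro b _ _ h
    cases b with
    | nil => rfl
    | cons y ys => exact absurd ((h y).mpr (by simp)) (by simp)
  | cons x xs ih =>
    intro b ha hb h
    cases b with
    | nil => exact absurd ((h x).mp (by simp)) (by simp)
    | cons y ys =>
      rw [List.pairwise_cons] at ha hb
      have hxy : x = y := by
        by_contra hne
        have h1 : x ∈ y :: ys := (h x).mp (by simp)
        have h2 : y ∈ x :: xs := (h y).mpr (by simp)
        have h3 : y < x := hb.1 x (by rcases List.mem_cons.mp h1 with h | h; exact absurd h hne; exact h)
        have h4 : x < y := ha.1 y (by rcases List.mem_cons.mp h2 with h | h; exact absurd h.symm hne; exact h)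
        omega
      subst hxy
      have htail : ∀ z, z ∈ xs ↔ z ∈ ys := by
        intro z
        constructor
        · intro hz
          have hlt := ha.1 z hz
          rcases List.mem_cons.mp ((h z).mp (by simp [hz])) with rfl | h'
          · omega
          · exact h'
        · intro hz
          have hlt := hb.1 z hz
          rcases List.mem_cons.mp ((h z).mpr (by simp [hz])) with rfl | h'
          · omega
          · exact h'
      rw [ih ys ha.2 hb.2 htail]

-- selecting the minimum key splits the sorted distinct-key list at its head
lemma pv_keys_sel (l : List (Bool × Int)) (k0 : Int)
    (hmem : k0 ∈ l.map (fun m => m.2)) (hle : ∀ x ∈ l, k0 ≤ x.2) :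
    PySem.List.sorted (PySem.Set.ofList (l.map (fun m => m.2))) (fun k => k)
      = k0 :: PySem.List.sorted (PySem.Set.ofList ((l.filter (fun x => x.2 ≠ k0)).map (fun m => m.2))) (fun k => k) := by
  have hpw1 := PySem.List.sorted_ofList_pairwise_lt (xs := l.map (fun m => m.2)) (κ := Int)
  have hpw2 := PySem.List.sorted_ofList_pairwise_lt (xs := (l.filter (fun x => x.2 ≠ k0)).map (fun m => m.2)) (κ := Int)
  have hmem2 : ∀ k, k ∈ PySem.List.sorted (PySem.Set.ofList ((l.filter (fun x => x.2 ≠ k0)).map (fun m => m.2))) (fun k => k)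
      ↔ (k ∈ l.map (fun m => m.2) ∧ k ≠ k0) := by
    intro k
    rw [PySem.List.mem_sorted, PySem.Set.mem_ofList]
    constructor
    · intro hk
      obtain ⟨x, hx, hxk⟩ := List.mem_map.mp hk
      have hxl := List.mem_filter.mp hx
      refine ⟨List.mem_map.mpr ⟨x, hxl.1, hxk⟩, ?_⟩
      have := hxl.2
      simp at this
      omega
    · rintro ⟨hk, hne⟩
      obtain ⟨x, hx, hxk⟩ := List.mem_map.mp hk
      exact List.mem_map.mpr ⟨x, List.mem_filter.mpr ⟨hx, by simp; omega⟩, hxk⟩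
  refine pv_eq_of_sorted_mem _ _ hpw1 ?_ ?_
  · rw [List.pairwise_cons]
    refine ⟨?_, hpw2⟩
    intro k hk
    have h2 := (hmem2 k).mp hk
    obtain ⟨x, hx, hxk⟩ := List.mem_map.mp h2.1
    have := hle x hx
    have := h2.2
    omega
  · intro k
    rw [PySem.List.mem_sorted, PySem.Set.mem_ofList, List.mem_cons, hmem2]
    constructor
    · intro hk
      by_cases h : k = k0
      · exact Or.inl h
      · exact Or.inr ⟨hk, h⟩
    · rintro (rfl | ⟨hk, _⟩)
      · exact hmem
      · exact hk

-- KEY: the stable sort starts with the minimum-position group, followed by the sort of the rest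
lemma pv_key (l : List (Bool × Int)) (k0 : Int)
    (hmem : k0 ∈ l.map (fun m => m.2)) (hle : ∀ x ∈ l, k0 ≤ x.2) :
    PySem.List.sorted l (fun m => m.2)
      = l.filter (fun x => x.2 == k0)
        ++ PySem.List.sorted (l.filter (fun x => x.2 ≠ k0)) (fun m => m.2) := by
  rw [pv_sorted_groups l, pv_sorted_groups (l.filter (fun x => x.2 ≠ k0)), pv_keys_sel l k0 hmem hle,
    List.flatMap_cons]
  congr 1
  refine List.flatMap_congr ?_
  intro k hk
  have hkne : k ≠ k0 := by
    have hpw := PySem.List.sorted_ofList_pairwise_lt (xs := (l.filter (fun x => x.2 ≠ k0)).map (fun m => m.2)) (κ := Int)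
    have := (PySem.List.mem_sorted _ _ _ _).mp hk
    have hkm := (PySem.Set.mem_ofList _ _).mp this
    obtain ⟨x, hx, hxk⟩ := List.mem_map.mp hkm
    have := (List.mem_filter.mp hx).2
    simp at this
    omega
  rw [List.filter_filter]
  refine (List.filter_congr ?_).symm
  intro x _
  by_cases h : x.2 = k
  · simp [h, hkne]
  · simp [h]

-- appending one rendered mark at a time is appending the rendered group
lemma pv_foldl_marks (lm rm : String) (bs : List Bool) : ∀ res : List String,
    bs.foldl (fun r m => r ++ [if m then lm else rm]) res
      = res ++ bs.map (fun m => if m then lm else rm) := by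
  induction bs with
  | nil => simp
  | cons b t ih => intro res; simp [ih]

-- sweeping one group whose marks all sit at position k, starting already at k
lemma pv_inner (u lm rm : String) (k : Int) (ms : List (Bool × Int)) (h : ∀ m ∈ ms, m.2 = k) :
    ∀ res, ms.foldl (pvStepA u lm rm) (k, res)
      = (k, (ms.map (fun m => m.1)).foldl (fun r m => r ++ [if m then lm else rm]) res) := by
  induction ms with
  | nil => intro res; rfl
  | cons m t ih =>
    intro res
    have hm : m.2 = k := h m (by simp)
    have hstep : pvStepA u lm rm (k, res) m = (k, res ++ [if m.1 then lm else rm]) := by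
      simp [pvStepA, hm]
    rw [List.foldl_cons, hstep, ih (fun y hy => h y (by simp [hy]))]
    simp

-- sweeping one whole nonempty group from an arbitrary running index
lemma pv_group (u lm rm : String) (k : Int) (ms : List (Bool × Int))
    (h : ∀ m ∈ ms, m.2 = k) (hne : ms ≠ []) (i : Int) (res : List String) :
    ms.foldl (pvStepA u lm rm) (i, res)
      = (k, (ms.map (fun m => m.1)).foldl (fun r m => r ++ [if m then lm else rm])
          (if i ≠ k then res ++ [PySem.Str.slice u (some i) (some k)] else res)) := by
  cases ms with
  | nil => exact absurd rfl hne
  | cons m t =>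
    have hm : m.2 = k := h m (by simp)
    have hstep : pvStepA u lm rm (i, res) m
        = (k, (if i ≠ k then res ++ [PySem.Str.slice u (some i) (some k)] else res) ++ [if m.1 then lm else rm]) := by
      by_cases hik : i = k
      · simp [pvStepA, hm, hik]
      · simp [pvStepA, hm, hik]
    rw [List.foldl_cons, hstep, pv_inner u lm rm k t (fun y hy => h y (by simp [hy]))]
    simp

-- B's selection sweep computes A's fold over the stably sorted events
lemma pv_sweep (u lm rm : String) : ∀ (n : Nat) (l : List (Bool × Int)), l.length ≤ n →
    ∀ (i : Int) (res : List String),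
      addMarkSweep u lm rm l i res
        = ((PySem.List.sorted l (fun m => m.2)).foldl (pvStepA u lm rm) (i, res)).2 := by
  intro n
  induction n with
  | zero =>
    intro l hl i res
    have : l = [] := List.eq_nil_of_length_eq_zero (Nat.le_zero.mp hl)
    subst this
    simp [addMarkSweep]
    rfl
  | succ n ih =>
    intro l hl i res
    cases l with
    | nil => simp [addMarkSweep]; rfl
    | cons e t =>
      set pos := pvMinPos e.2 t with hpos
      have hspec := pvMinPos_spec t e.2
      rw [← hpos] at hspec
      have hmem : pos ∈ (e :: t).map (fun m => m.2) := by
        rcases hspec.1 with h1 | ⟨x, hx, hx2⟩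
        · exact List.mem_map.mpr ⟨e, by simp, h1.symm⟩
        · exact List.mem_map.mpr ⟨x, by simp [hx], hx2⟩
      have hle : ∀ x ∈ e :: t, pos ≤ x.2 := by
        intro x hx
        rcases List.mem_cons.mp hx with rfl | hxt
        · exact hspec.2.1
        · exact hspec.2.2 x hxt
      have hstep : addMarkSweep u lm rm (e :: t) i res
          = addMarkSweep u lm rm ((e :: t).filter (fun x => x.2 ≠ pos)) pos
              ((if i ≠ pos then res ++ [PySem.Str.slice u (some i) (some pos)] else res)
                ++ ((e :: t).filter (fun x => x.2 == pos)).map (fun x => if x.1 then lm else rm)) := by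
        rw [addMarkSweep]
      have hGk : ∀ m ∈ (e :: t).filter (fun x => x.2 == pos), m.2 = pos := by
        intro m hm
        have := (List.mem_filter.mp hm).2
        simpa using this
      have hGne : (e :: t).filter (fun x => x.2 == pos) ≠ [] := by
        obtain ⟨x, hx, hxk⟩ := List.mem_map.mp hmem
        exact List.ne_nil_of_mem (List.mem_filter.mpr ⟨hx, by simp [hxk]⟩)
      have hlen : ((e :: t).filter (fun x => x.2 ≠ pos)).length ≤ n := by
        have := pv_filter_shrink e t
        rw [← hpos] at this
        omega
      rw [hstep, ih _ hlen, pv_key (e :: t) pos hmem hle, List.foldl_append,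
        pv_group u lm rm pos _ hGk hGne i res, pv_foldl_marks, List.map_map]
      rfl

theorem pv_main (u : String) (c : List (Int × Int)) (lm rm sep : String) :
    add_mark u c lm rm sep = add_mark_alt u c lm rm sep := by
  have hA : add_mark u c lm rm sep
      = PySem.Str.join sep
          (((PySem.List.sorted (c.flatMap (fun s => [(true, s.1), (false, s.2)])) (fun m => m.2)).foldl
            (pvStepA u lm rm) (0, []))).2 := by
    show PySem.Str.join sep
        (((PySem.List.sorted (c.foldl (fun ms span => (ms ++ [(true, span.1)]) ++ [(false, span.2)]) [])
          (fun m => m.2)).foldl (pvStepA u lm rm) (0, []))).2 = _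
    rw [pv_marks_foldl c []]
    rfl
  have hB : add_mark_alt u c lm rm sep
      = PySem.Str.join sep
          (addMarkSweep u lm rm (c.flatMap (fun s => [(true, s.1), (false, s.2)])) 0 []) := by
    show PySem.Str.join sep
        (addMarkSweep u lm rm (c.foldl (fun ev span => ev ++ [(true, span.1), (false, span.2)]) []) 0 []) = _
    rw [pv_events_foldl c []]
    rfl
  rw [hA, hB, pv_sweep u lm rm (c.flatMap (fun s => [(true, s.1), (false, s.2)])).length _ (le_refl _) 0 []]

-- ===== VERDICT (by name: the statement is the Claim_ definition above) =====
theorem add_mark_spec : Claim_equal_add_mark := by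
  intro utterance candidates left_mark right_mark separator _
  show _ = _
  exact pv_main utterance candidates left_mark right_mark separator
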